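-- pv_equiv track=rewrite | github.com/pypi-data/pypi-mirror-371 | packages/git-ai-reporter/git_ai_reporter-0.1.0.tar.gz/git_ai_reporter-0.1.0/src/git_ai_reporter/prompt_fitting/utils/line_analysis.py | cluster_nearby_indices
-- ===== SOURCE A (Python) =====
-- def cluster_nearby_indices(
--     indices: list[int], max_distance: int, min_cluster_size: int = 1
-- ) -> list[list[int]]:
--     """Cluster indices that are within a maximum distance of each other.
--
--     This function groups indices into clusters where each index in a cluster
--     is within max_distance of at least one other index in the same cluster.
--     Only clusters meeting the minimum size requirement are returned.
--
--     Args: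
--         indices: List of indices to cluster
--         max_distance: Maximum distance between indices to be in same cluster
--         min_cluster_size: Minimum number of indices required for a valid cluster
--
--     Returns:
--         List of clusters, where each cluster is a list of indices
--
--     Examples:
--         >>> cluster_nearby_indices([1, 2, 3, 10, 11, 20], max_distance=2, min_cluster_size=2)
--         [[1, 2, 3], [10, 11]]
--         >>> cluster_nearby_indices([1, 5, 6, 15], max_distance=1, min_cluster_size=2)
--         [[5, 6]]
--     """
--     if not indices:
--         return []
--
--     sorted_indices = sorted(indices)
--     clusters: list[list[int]] = []
--     current_cluster = [sorted_indices[0]]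
--
--     for i in range(1, len(sorted_indices)):
--         if sorted_indices[i] - sorted_indices[i - 1] <= max_distance:
--             current_cluster.append(sorted_indices[i])
--         else:
--             if len(current_cluster) >= min_cluster_size:
--                 clusters.append(current_cluster)
--             current_cluster = [sorted_indices[i]]
--
--     # Don't forget the last cluster
--     if len(current_cluster) >= min_cluster_size:
--         clusters.append(current_cluster)
--
--     return clusters
-- ===== SOURCE B (Python) =====
-- def cluster_nearby_indices(indices, max_distance, min_cluster_size=1):
--     """Three separate passes: find cut positions, slice into segments, filter by size."""
--     if not indices:
--         return []
--     s = sorted(indices)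
--     cuts = [i for i, (prev, cur) in enumerate(zip(s, s[1:]), 1) if cur - prev > max_distance]
--     bounds = [0] + cuts + [len(s)]
--     segments = [s[lo:hi] for lo, hi in zip(bounds, bounds[1:])]
--     return [seg for seg in segments if len(seg) >= min_cluster_size]
-- ===== Notes on version B (the rewrite author's own statement) =====
-- stated objective: alternative
-- what changed: Replaces A's single accumulator loop (growing current_cluster, flushing on gaps) by three separate passes: collect cut positions where consecutive sorted values differ by more than max_distance, slice the sorted list at those boundaries into segments, then filter segments by min_cluster_size.
import Mathlib
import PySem

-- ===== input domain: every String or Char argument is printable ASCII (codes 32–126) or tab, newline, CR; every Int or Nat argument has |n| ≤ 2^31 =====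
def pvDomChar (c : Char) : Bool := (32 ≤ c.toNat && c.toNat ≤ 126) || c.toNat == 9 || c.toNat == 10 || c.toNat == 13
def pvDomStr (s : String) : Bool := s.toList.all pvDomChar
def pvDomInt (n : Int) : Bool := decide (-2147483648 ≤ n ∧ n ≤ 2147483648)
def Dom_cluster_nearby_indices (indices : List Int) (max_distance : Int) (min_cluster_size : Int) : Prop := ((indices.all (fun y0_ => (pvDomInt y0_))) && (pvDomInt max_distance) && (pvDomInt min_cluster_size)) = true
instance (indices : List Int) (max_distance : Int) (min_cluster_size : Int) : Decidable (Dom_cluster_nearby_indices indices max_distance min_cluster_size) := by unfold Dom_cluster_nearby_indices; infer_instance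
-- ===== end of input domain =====

-- B replaces A's one accumulator loop by three passes (find cut positions, slice into
-- segments, filter by size); alternative decomposition, same cost.

-- ===== PORT A =====
-- the body of A's for-loop: state = (clusters, current_cluster), input = (s[i], s[i-1])
def clusterStepA (max_distance min_cluster_size : Int)
    (st : List (List Int) × List Int) (pr : Int × Int) : List (List Int) × List Int :=
  if pr.1 - pr.2 ≤ max_distance then (st.1, st.2 ++ [pr.1])
  else ((if min_cluster_size ≤ (st.2.length : Int) then st.1 ++ [st.2] else st.1), [pr.1])

-- A's code after the sort: current_cluster = [s[0]]; loop over i in range(1, n)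
-- (pairs (s[i], s[i-1]) are rest.zip (x :: rest)); then flush the last cluster
def clusterBodyA (max_distance min_cluster_size : Int) : List Int → List (List Int)
  | [] => []  -- unreachable: sorted of a nonempty list is nonempty
  | x :: rest =>
    let st := (rest.zip (x :: rest)).foldl (clusterStepA max_distance min_cluster_size) ([], [x])
    if min_cluster_size ≤ (st.2.length : Int) then st.1 ++ [st.2] else st.1

def cluster_nearby_indices (indices : List Int) (max_distance : Int) (min_cluster_size : Int) : List (List Int) :=
  if indices = [] then []
  else clusterBodyA max_distance min_cluster_size (PySem.List.sorted indices (fun x => x) false)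

-- ===== PORT B =====
def cluster_nearby_indices_alt (indices : List Int) (max_distance : Int) (min_cluster_size : Int) : List (List Int) :=
  if indices = [] then []
  else
    let s := PySem.List.sorted indices (fun x => x) false
    -- cuts = [i for i, (prev, cur) in enumerate(zip(s, s[1:]), 1) if cur - prev > max_distance]
    let cuts : List Int :=
      ((PySem.List.enumerate (s.zip (PySem.List.slice s (some 1) none)) 1).filter
        (fun p => decide (max_distance < p.2.2 - p.2.1))).map (·.1)
    -- bounds = [0] + cuts + [len(s)]
    let bounds : List Int := 0 :: (cuts ++ [(s.length : Int)])
    -- segments = [s[lo:hi] for lo, hi in zip(bounds, bounds[1:])]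
    let segments := (bounds.zip bounds.tail).map (fun p => PySem.List.slice s (some p.1) (some p.2))
    segments.filter (fun seg => decide (min_cluster_size ≤ (seg.length : Int)))

-- ===== PRECONDITION & SPEC =====
def Spec_cluster_nearby_indices (indices : List Int) (max_distance : Int) (min_cluster_size : Int) (out : List (List Int)) : Prop := out = cluster_nearby_indices_alt indices max_distance min_cluster_size
instance (indices : List Int) (max_distance : Int) (min_cluster_size : Int) (out : List (List Int)) : Decidable (Spec_cluster_nearby_indices indices max_distance min_cluster_size out) := by unfold Spec_cluster_nearby_indices; infer_instance

-- ===== CLAIM (what is proved, stated in full; the proofs are below) =====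
def Claim_equal_cluster_nearby_indices : Prop := ∀ (indices : List Int) (max_distance : Int) (min_cluster_size : Int), Dom_cluster_nearby_indices indices max_distance min_cluster_size → Spec_cluster_nearby_indices indices max_distance min_cluster_size (cluster_nearby_indices indices max_distance min_cluster_size)

-- ===== LEMMAS AND PROOFS =====

-- reference: chunks with accumulator (A's loop without the filter)
def chunksAcc (d : Int) (cur : List Int) (p : Int) : List Int → List (List Int)
  | [] => [cur]
  | y :: ys => if y - p ≤ d then chunksAcc d (cur ++ [y]) y ys
               else cur :: chunksAcc d [y] y ys

-- reference: chunks without accumulator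
def chunksN (d : Int) : List Int → List (List Int)
  | [] => []
  | [x] => [[x]]
  | x :: y :: ys =>
    if y - x ≤ d then
      match chunksN d (y :: ys) with
      | c :: cs => (x :: c) :: cs
      | [] => [[x]]
    else [x] :: chunksN d (y :: ys)

theorem chunksN_ne_nil (d : Int) (x : Int) (xs : List Int) : chunksN d (x :: xs) ≠ [] := by
  cases xs with
  | nil => simp [chunksN]
  | cons y ys =>
    simp only [chunksN]
    split
    · cases h : chunksN d (y :: ys) <;> simp
    · simp

theorem A_fold_eq (d m : Int) : ∀ (ys : List Int) (p : Int) (clusters : List (List Int)) (cur : List Int),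
    (let st := (ys.zip (p :: ys)).foldl (clusterStepA d m) (clusters, cur);
     if m ≤ (st.2.length : Int) then st.1 ++ [st.2] else st.1)
    = clusters ++ (chunksAcc d cur p ys).filter (fun c => decide (m ≤ (c.length : Int))) := by
  intro ys
  induction ys with
  | nil =>
    intro p clusters cur
    simp only [List.zip_nil_left, List.foldl_nil, chunksAcc]
    by_cases h : m ≤ (cur.length : Int) <;> simp [h]
  | cons y ys ih =>
    intro p clusters cur
    simp only [List.zip_cons_cons, List.foldl_cons, chunksAcc, clusterStepA]
    by_cases hg : y - p ≤ d
    · simp only [hg, if_pos]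
      exact ih y clusters (cur ++ [y])
    · simp only [hg, if_neg, not_false_iff, List.filter_cons]
      rw [ih y _ [y]]
      by_cases h : m ≤ (cur.length : Int) <;> simp [h, List.append_assoc]

theorem chunksAcc_eq_chunksN (d : Int) : ∀ (ys : List Int) (p : Int) (cur : List Int),
    chunksAcc d (cur ++ [p]) p ys
    = (match chunksN d (p :: ys) with
       | c :: cs => (cur ++ c) :: cs
       | [] => []) := by
  intro ys
  induction ys with
  | nil => intro p cur; simp [chunksAcc, chunksN]
  | cons y ys ih =>
    intro p cur
    simp only [chunksAcc, chunksN]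
    by_cases hg : y - p ≤ d
    · simp only [hg, if_pos]
      have h1 := ih y (cur ++ [p])
      have h2 : ∃ c cs, chunksN d (y :: ys) = c :: cs := by
        cases h : chunksN d (y :: ys) with
        | nil => exact absurd h (chunksN_ne_nil d y ys)
        | cons c cs => exact ⟨c, cs, rfl⟩
      obtain ⟨c, cs, hc⟩ := h2
      rw [hc] at h1 ⊢
      simpa [List.append_assoc] using h1
    · simp only [hg, if_neg, not_false_iff]
      have h1 := ih y []
      have h2 : ∃ c cs, chunksN d (y :: ys) = c :: cs := by
        cases h : chunksN d (y :: ys) with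
        | nil => exact absurd h (chunksN_ne_nil d y ys)
        | cons c cs => exact ⟨c, cs, rfl⟩
      obtain ⟨c, cs, hc⟩ := h2
      rw [hc] at h1 ⊢
      simp at h1
      simp [h1]

-- B-side abbreviations (the two passes of port B, named for the lemmas)
def cutsF (d : Int) (s : List Int) : List Int :=
  ((PySem.List.enumerate (s.zip (PySem.List.slice s (some 1) none)) 1).filter
    (fun p => decide (d < p.2.2 - p.2.1))).map (·.1)

def segsF (d : Int) (s : List Int) : List (List Int) :=
  let bounds : List Int := 0 :: (cutsF d s ++ [(s.length : Int)])
  (bounds.zip bounds.tail).map (fun p => PySem.List.slice s (some p.1) (some p.2))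

theorem enumerate_shift {α : Type} (l : List α) (k : Int) :
    PySem.List.enumerate l (k + 1) = (PySem.List.enumerate l k).map (fun p => (p.1 + 1, p.2)) := by
  induction l generalizing k with
  | nil => simp [PySem.List.enumerate_nil]
  | cons a l ih => simp [PySem.List.enumerate_cons, ih]

theorem cuts_cons (d x y : Int) (ys : List Int) :
    cutsF d (x :: y :: ys)
    = (if d < y - x then [(1 : Int)] else []) ++ (cutsF d (y :: ys)).map (· + 1) := by
  simp only [cutsF, PySem.List.slice_from_one, List.tail_cons, List.zip_cons_cons,
    PySem.List.enumerate_cons, enumerate_shift, List.filter_cons]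
  rw [List.filter_map, List.map_map]
  by_cases h : d < y - x <;> simp [h, Function.comp_def]

theorem cuts_nonneg (d : Int) (s : List Int) : ∀ i ∈ cutsF d s, (0 : Int) ≤ i := by
  intro i hi
  simp only [cutsF, List.mem_map] at hi
  obtain ⟨p, hp, rfl⟩ := hi
  have hm := List.mem_of_mem_filter hp
  rw [PySem.List.mem_enumerate_iff] at hm
  obtain ⟨k, hk, rfl⟩ := hm
  simp
  omega

theorem slice_succ (z : Int) (t : List Int) (a b : Int) (ha : 0 ≤ a) (hb : 0 ≤ b) :
    PySem.List.slice (z :: t) (some (a + 1)) (some (b + 1)) = PySem.List.slice t (some a) (some b) := by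
  rw [PySem.List.slice_toNat _ (by omega) (by omega), PySem.List.slice_toNat _ ha hb]
  have h1 : (a + 1).toNat = a.toNat + 1 := by omega
  have h2 : (b + 1).toNat = b.toNat + 1 := by omega
  simp [h1, h2]

theorem seg_shift (z : Int) (t : List Int) : ∀ (L : List Int), (∀ b ∈ L, (0 : Int) ≤ b) →
    ((L.map (· + 1)).zip (L.map (· + 1)).tail).map
        (fun p => PySem.List.slice (z :: t) (some p.1) (some p.2))
    = (L.zip L.tail).map (fun p => PySem.List.slice t (some p.1) (some p.2)) := by
  intro L
  induction L with
  | nil => simp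
  | cons a L ih =>
    intro h
    cases L with
    | nil => simp
    | cons b L' =>
      have hrest := ih (fun c hc => h c (List.mem_cons_of_mem a hc))
      simp only [List.map_cons, List.tail_cons, List.zip_cons_cons, List.map_cons] at hrest ⊢
      rw [slice_succ z t a b (h a (by simp)) (h b (by simp)), hrest]

theorem segsF_eq_chunksN (d : Int) : ∀ (s : List Int), s ≠ [] → segsF d s = chunksN d s := by
  intro s
  induction s with
  | nil => intro h; exact absurd rfl h
  | cons x t ih =>
    intro _
    cases t with
    | nil =>
      simp only [segsF, cutsF, chunksN, PySem.List.slice_from_one, List.tail_cons,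
        List.zip_nil_right, PySem.List.enumerate_nil, List.filter_nil, List.map_nil,
        List.nil_append, List.length_cons, List.length_nil, List.zip_cons_cons, List.map_cons]
      rw [PySem.List.slice_toNat _ (by norm_num) (by norm_num)]
      simp
    | cons y ys =>
      have ihT : segsF d (y :: ys) = chunksN d (y :: ys) := ih (by simp)
      obtain ⟨b0, bs, hB⟩ : ∃ b0 bs, cutsF d (y :: ys) ++ [(((y :: ys).length : Nat) : Int)] = b0 :: bs := by
        cases hq : cutsF d (y :: ys) ++ [(((y :: ys).length : Nat) : Int)] with
        | nil => simp at hq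
        | cons a l => exact ⟨a, l, rfl⟩
      have hpos : ∀ c ∈ b0 :: bs, (0 : Int) ≤ c := by
        rw [← hB]
        intro c hc
        rcases List.mem_append.mp hc with hm | hm
        · exact cuts_nonneg d _ c hm
        · simp at hm; omega
      have hb0 : (0 : Int) ≤ b0 := hpos b0 (by simp)
      have hmapB : (cutsF d (y :: ys)).map (· + 1) ++ [(((x :: y :: ys).length : Nat) : Int)]
          = (b0 + 1) :: bs.map (· + 1) := by
        have hl : (((x :: y :: ys).length : Nat) : Int) = (((y :: ys).length : Nat) : Int) + 1 := by
          simp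
        rw [hl]
        have hmm := congrArg (List.map (· + 1)) hB
        simpa [List.map_append] using hmm
      have hsegT0 : segsF d (y :: ys)
          = ((0 :: b0 :: bs).zip (b0 :: bs)).map
              (fun p => PySem.List.slice (y :: ys) (some p.1) (some p.2)) := by
        simp only [segsF, hB, List.tail_cons]
      by_cases hg : y - x ≤ d
      · -- no gap: first segment of (y::ys) gains x in front
        have hshift := seg_shift x (y :: ys) (b0 :: bs) hpos
        simp only [List.map_cons, List.tail_cons] at hshift
        have hcut : cutsF d (x :: y :: ys) = (cutsF d (y :: ys)).map (· + 1) := by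
          rw [cuts_cons]; simp [show ¬ d < y - x by omega]
        have hL : segsF d (x :: y :: ys)
            = PySem.List.slice (x :: y :: ys) (some 0) (some (b0 + 1)) ::
              ((b0 :: bs).zip bs).map (fun p => PySem.List.slice (y :: ys) (some p.1) (some p.2)) := by
          simp only [segsF, hcut, hmapB, List.tail_cons, List.zip_cons_cons, List.map_cons]
          rw [hshift]
        have hhead : PySem.List.slice (x :: y :: ys) (some 0) (some (b0 + 1))
            = x :: PySem.List.slice (y :: ys) (some 0) (some b0) := by
          rw [PySem.List.slice_toNat _ (by omega) (by omega), PySem.List.slice_toNat _ (by omega) hb0]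
          have h1 : (b0 + 1).toNat = b0.toNat + 1 := by omega
          simp [h1]
        have hsegT : chunksN d (y :: ys)
            = PySem.List.slice (y :: ys) (some 0) (some b0) ::
              ((b0 :: bs).zip bs).map (fun p => PySem.List.slice (y :: ys) (some p.1) (some p.2)) := by
          rw [← ihT, hsegT0]
          simp only [List.zip_cons_cons, List.map_cons]
        rw [hL, hhead, chunksN]
        simp only [hg, if_pos, hsegT]
      · -- gap: [x] splits off
        have hpos0 : ∀ c ∈ (0 : Int) :: b0 :: bs, (0 : Int) ≤ c := by
          intro c hc
          rcases List.mem_cons.mp hc with hcc | hcc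
          · omega
          · exact hpos c hcc
        have hshift := seg_shift x (y :: ys) (0 :: b0 :: bs) hpos0
        simp only [List.map_cons, List.tail_cons, List.zip_cons_cons, List.map_cons, zero_add] at hshift
        have hcut : cutsF d (x :: y :: ys) = 1 :: (cutsF d (y :: ys)).map (· + 1) := by
          rw [cuts_cons]; simp [show d < y - x by omega]
        have hL : segsF d (x :: y :: ys)
            = PySem.List.slice (x :: y :: ys) (some 0) (some 1) ::
              ((0 :: b0 :: bs).zip (b0 :: bs)).map
                (fun p => PySem.List.slice (y :: ys) (some p.1) (some p.2)) := by
          simp only [segsF, hcut, List.cons_append, hmapB, List.tail_cons, List.zip_cons_cons,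
            List.map_cons]
          rw [hshift]
        have hhead : PySem.List.slice (x :: y :: ys) (some 0) (some 1) = [x] := by
          rw [PySem.List.slice_toNat _ (by norm_num) (by norm_num)]
          simp
        rw [hL, hhead, ← hsegT0, ihT, chunksN]
        simp [hg]

-- ===== VERDICT (by name: the statement is the Claim_ definition above) =====
theorem cluster_nearby_indices_spec : Claim_equal_cluster_nearby_indices := by
  intro indices d m _
  unfold Spec_cluster_nearby_indices cluster_nearby_indices cluster_nearby_indices_alt
  by_cases h : indices = []
  · simp [h]
  · simp only [h, if_false]
    cases hs : PySem.List.sorted indices (fun x => x) false with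
    | nil => exact absurd ((PySem.List.sorted_eq_nil_iff indices _ _).mp hs) h
    | cons x rest =>
      have hA := A_fold_eq d m rest x [] [x]
      simp only [List.nil_append] at hA
      obtain ⟨c, cs, hc⟩ : ∃ c cs, chunksN d (x :: rest) = c :: cs := by
        cases hq : chunksN d (x :: rest) with
        | nil => exact absurd hq (chunksN_ne_nil d x rest)
        | cons c cs => exact ⟨c, cs, rfl⟩
      have hC := chunksAcc_eq_chunksN d rest x []
      rw [hc] at hC
      simp only [List.nil_append] at hC
      have hB2 := segsF_eq_chunksN d (x :: rest) (by simp)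
      show clusterBodyA d m (x :: rest) = _
      rw [clusterBodyA, hA, hC, ← hc, ← hB2]
      simp only [segsF, cutsF]
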